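-- pv_equiv track=rewrite | github.com/Aidr0ne/AocProjects | 2023/1p1.py | solution
-- ===== SOURCE A (Python) =====
-- def solution(list):
--     sum = 0
--     target = ["1", "2", "3", "4", "5", "6", "7", "8", "9", "0"]
--     for i in range(len(list)):
--         first = 0
--         last = 0
--         conbined = 0
--         word = list[i]
--         for x in range(len(word)):
--             if word[x] in target:
--                 first = word[x]
--                 break
--
--         for x in range(len(word)):
--             if word[-(x+1)] in target:
--                 last = word[-(x+1)]
--                 break
--         conbined = int(str(first) + str(last))
--         sum += conbined
--
--     return sum
-- ===== SOURCE B (Python) =====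
-- def solution(list):
--     digits_set = set("0123456789")
--     total = 0
--     for word in list:
--         digits = [c for c in word if c in digits_set]
--         if digits:
--             total += int(digits[0] + digits[-1])
--     return total
-- ===== Notes on version B (the rewrite author's own statement) =====
-- stated objective: simpler
-- what changed: One comprehension per word collecting all digit characters (membership in a set), then first/last of that list, instead of an index-based outer loop with two separate break-scan loops (forward and via negative indices) per word.
import Mathlib
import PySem

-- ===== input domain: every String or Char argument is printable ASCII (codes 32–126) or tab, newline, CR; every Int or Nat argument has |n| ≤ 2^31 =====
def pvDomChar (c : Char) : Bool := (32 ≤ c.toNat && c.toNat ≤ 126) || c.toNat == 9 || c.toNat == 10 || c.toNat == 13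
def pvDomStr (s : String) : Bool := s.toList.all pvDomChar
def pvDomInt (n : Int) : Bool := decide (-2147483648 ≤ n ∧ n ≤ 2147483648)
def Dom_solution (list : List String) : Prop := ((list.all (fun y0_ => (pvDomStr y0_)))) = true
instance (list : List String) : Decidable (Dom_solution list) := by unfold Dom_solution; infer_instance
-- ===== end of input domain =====

-- B replaces A's two per-word break-scan loops (forward, and backward via negative
-- indices) with one comprehension collecting the word's digits, then first/last of it.

-- ===== PORT A =====
-- target = ["1", ..., "0"]; membership test 'word[x] in target'
def pvTargetA (c : Char) : Bool := c ∈ ['1','2','3','4','5','6','7','8','9','0']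

-- 'for x in range(len(word)): if word[x] in target: first = word[x]; break'
-- first is 0 (rendered as str(0) = "0", kept as chars) when no digit is found,
-- else the one found digit character.
def pvScanA : List Char → List Char
  | [] => ['0']
  | c :: rest => if pvTargetA c then [c] else pvScanA rest

def solution (list : List String) : Int :=
  list.foldl (fun sum word =>
    let first := pvScanA word.toList
    -- second loop reads word[-(x+1)], i.e. scans the word back to front
    let last := pvScanA word.toList.reverse
    -- int(str(first) + str(last)); ofStr? is always 'some' here (two digit chars)
    sum + (PySem.Int.ofStr? (String.ofList (first ++ last))).getD 0) 0

-- ===== PORT B =====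
def pvDigitB (c : Char) : Bool := c ∈ "0123456789".toList

def solution_alt (list : List String) : Int :=
  list.foldl (fun total word =>
    let digits := word.toList.filter pvDigitB
    match digits with
    | [] => total
    -- int(digits[0] + digits[-1]); digits is nonempty here, so digits[-1] is its last
    -- element, and ofStr? is always 'some' (two digit chars)
    | d :: rest => total + (PySem.Int.ofStr? (String.ofList [d, (d :: rest).getLast (by simp)])).getD 0) 0

-- ===== PRECONDITION & SPEC =====
def Spec_solution (list : List String) (out : Int) : Prop := out = solution_alt list
instance (list : List String) (out : Int) : Decidable (Spec_solution list out) := by unfold Spec_solution; infer_instance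

-- ===== CLAIM (what is proved, stated in full; the proofs are below) =====
def Claim_equal_solution : Prop := ∀ (list : List String), Dom_solution list → Spec_solution list (solution list)

-- ===== LEMMAS AND PROOFS =====

theorem pvTarget_eq_digit (c : Char) : pvTargetA c = pvDigitB c := by
  rw [Bool.eq_iff_iff]; simp [pvTargetA, pvDigitB]; tauto

theorem pvScanA_filter (l : List Char) :
    pvScanA l = match l.filter pvTargetA with | [] => ['0'] | c :: _ => [c] := by
  induction l with
  | nil => rfl
  | cons c rest ih =>
    by_cases h : pvTargetA c = true <;> simp [pvScanA, h, ih]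

theorem pvWord_eq (s : Int) (word : String) :
    (let first := pvScanA word.toList
     let last := pvScanA word.toList.reverse
     s + (PySem.Int.ofStr? (String.ofList (first ++ last))).getD 0)
    = (let digits := word.toList.filter pvDigitB
       match digits with
       | [] => s
       | d :: rest => s + (PySem.Int.ofStr? (String.ofList [d, (d :: rest).getLast (by simp)])).getD 0) := by
  have hfil : word.toList.filter pvDigitB = word.toList.filter pvTargetA := by
    apply List.filter_congr; intro c _; rw [pvTarget_eq_digit]
  rw [pvScanA_filter, pvScanA_filter, List.filter_reverse, hfil]
  cases hd : word.toList.filter pvTargetA with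
  | nil => simp; decide
  | cons d rest =>
    simp only
    have hne : (d :: rest) ≠ [] := by simp
    obtain ⟨e, tail, hr⟩ : ∃ e tail, (d :: rest).reverse = e :: tail := by
      cases h : (d :: rest).reverse with
      | nil => exact absurd (congrArg List.length h) (by simp)
      | cons e t => exact ⟨e, t, rfl⟩
    rw [hr]
    have he : e = (d :: rest).getLast hne := by
      have h1 : (d :: rest).getLast? = some e := by
        rw [← List.head?_reverse, hr]; rfl
      have h2 : (d :: rest).getLast? = some ((d :: rest).getLast hne) :=
        List.getLast?_eq_some_getLast hne
      exact (Option.some_injective _ (h2.symm.trans h1)).symm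
    simp [he]

theorem solution_foldl_eq (list : List String) (s : Int) :
    list.foldl (fun sum word =>
      let first := pvScanA word.toList
      let last := pvScanA word.toList.reverse
      sum + (PySem.Int.ofStr? (String.ofList (first ++ last))).getD 0) s
    = list.foldl (fun total word =>
      let digits := word.toList.filter pvDigitB
      match digits with
      | [] => total
      | d :: rest => total + (PySem.Int.ofStr? (String.ofList [d, (d :: rest).getLast (by simp)])).getD 0) s := by
  induction list generalizing s with
  | nil => rfl
  | cons w ws ih => simp only [List.foldl_cons]; rw [pvWord_eq]; exact ih _

-- ===== VERDICT (by name: the statement is the Claim_ definition above) =====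
theorem solution_spec : Claim_equal_solution := by
  intro list _
  show solution list = solution_alt list
  unfold solution solution_alt
  exact solution_foldl_eq list 0
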